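-- pv_equiv track=rewrite | github.com/Hoaas/Supybot-plugins | Kommune/plugin.py | searchKommuner
-- ===== SOURCE A (Python) =====
-- def searchKommuner(kommuner, search):
--     """Return the first matching kommune dict for search, or None.
--
--     Search order:
--     1. Exact match by 4-digit number (if search is all digits).
--     2. Case-insensitive exact name match.
--     3. Case-insensitive prefix match on name.
--     4. Case-insensitive substring match on name.
--     """
--     if search.isdigit():
--         for k in kommuner:
--             if k['Nr'] == search:
--                 return k
--
--     lower = search.lower()
--
--     for k in kommuner:
--         if k['Kommunenavn'].lower() == lower:
--             return k
--
--     for k in kommuner: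
--         if k['Kommunenavn'].lower().startswith(lower):
--             return k
--
--     for k in kommuner:
--         if lower in k['Kommunenavn'].lower():
--             return k
--
--     return None
-- ===== SOURCE B (Python) =====
-- def searchKommuner(kommuner, search):
--     if search.isdigit():
--         for k in kommuner:
--             if k['Nr'] == search:
--                 return k
--     lower = search.lower()
--     pre = sub = None
--     for k in kommuner:
--         name = k['Kommunenavn'].lower()
--         if name == lower:
--             return k
--         elif pre is None and name.startswith(lower):
--             pre = k
--         elif sub is None and lower in name:
--             sub = k
--     return pre if pre is not None else sub
-- ===== Notes on version B (the rewrite author's own statement) =====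
-- stated objective: alternative
-- what changed: The three separate name scans (exact, prefix, substring) are fused into one single pass over kommuner that lowercases each name once, returns immediately on an exact match, and remembers the first prefix and first substring candidates for after the loop.
import Mathlib
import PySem

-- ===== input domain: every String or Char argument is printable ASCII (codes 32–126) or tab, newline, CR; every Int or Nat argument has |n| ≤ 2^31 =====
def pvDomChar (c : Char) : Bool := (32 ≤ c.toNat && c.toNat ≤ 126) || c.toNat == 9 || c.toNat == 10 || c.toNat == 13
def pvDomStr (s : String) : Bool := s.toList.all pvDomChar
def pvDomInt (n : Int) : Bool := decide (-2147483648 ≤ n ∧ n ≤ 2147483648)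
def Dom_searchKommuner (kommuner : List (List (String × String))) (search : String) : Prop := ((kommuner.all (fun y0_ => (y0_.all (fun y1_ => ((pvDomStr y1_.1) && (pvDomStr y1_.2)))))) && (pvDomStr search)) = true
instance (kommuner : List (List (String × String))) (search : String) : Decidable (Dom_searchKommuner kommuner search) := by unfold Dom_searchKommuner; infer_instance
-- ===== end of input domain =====

-- B fuses A's three name scans (exact / prefix / substring) into one pass; same results ('alternative').

-- ===== PORT A =====
-- loop 1: exact match by 'Nr' (only run when search.isdigit())
def pvFindNr (kommuner : List (List (String × String))) (search : String) : Option (List (String × String)) :=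
  match kommuner with
  | [] => none
  | k :: rest => if PySem.Dict.getD (PySem.Dict.mk k) "Nr" "" == search then some k else pvFindNr rest search

-- loop 2: exact name match
def pvFindExact (kommuner : List (List (String × String))) (lower : String) : Option (List (String × String)) :=
  match kommuner with
  | [] => none
  | k :: rest =>
    if PySem.Str.lower (PySem.Dict.getD (PySem.Dict.mk k) "Kommunenavn" "") == lower then some k
    else pvFindExact rest lower

-- loop 3: name prefix match
def pvFindPrefix (kommuner : List (List (String × String))) (lower : String) : Option (List (String × String)) :=
  match kommuner with
  | [] => none
  | k :: rest =>
    if PySem.Str.startswith (PySem.Str.lower (PySem.Dict.getD (PySem.Dict.mk k) "Kommunenavn" "")) lower then some k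
    else pvFindPrefix rest lower

-- loop 4: name substring match
def pvFindSub (kommuner : List (List (String × String))) (lower : String) : Option (List (String × String)) :=
  match kommuner with
  | [] => none
  | k :: rest =>
    if PySem.Str.isIn lower (PySem.Str.lower (PySem.Dict.getD (PySem.Dict.mk k) "Kommunenavn" "")) then some k
    else pvFindSub rest lower

def searchKommuner (kommuner : List (List (String × String))) (search : String) : Option (List (String × String)) :=
  match (if PySem.Str.strIsdigit search then pvFindNr kommuner search else none) with
  | some k => some k
  | none =>
    let lower := PySem.Str.lower search
    match pvFindExact kommuner lower with
    | some k => some k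
    | none =>
      match pvFindPrefix kommuner lower with
      | some k => some k
      | none => pvFindSub kommuner lower

-- ===== PORT B =====
-- one pass over the names: return on exact match; keep the first prefix and first substring candidates
def pvFused (kommuner : List (List (String × String))) (lower : String)
    (pre sub : Option (List (String × String))) : Option (List (String × String)) :=
  match kommuner with
  | [] => match pre with
    | some p => some p
    | none => sub
  | k :: rest =>
    let name := PySem.Str.lower (PySem.Dict.getD (PySem.Dict.mk k) "Kommunenavn" "")
    if name == lower then some k
    else if pre.isNone && PySem.Str.startswith name lower then pvFused rest lower (some k) sub
    else if sub.isNone && PySem.Str.isIn lower name then pvFused rest lower pre (some k)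
    else pvFused rest lower pre sub

def searchKommuner_alt (kommuner : List (List (String × String))) (search : String) : Option (List (String × String)) :=
  match (if PySem.Str.strIsdigit search then pvFindNr kommuner search else none) with
  | some k => some k
  | none => pvFused kommuner (PySem.Str.lower search) none none

-- ===== PRECONDITION & SPEC =====
-- A raises KeyError when a kommune dict lacks 'Kommunenavn' (or lacks 'Nr' while search.isdigit()).
-- Pre_ requires those keys in every dict; this slightly narrows A's domain (A can return before
-- reaching a dict with a missing key, e.g. on an earlier exact match); see claim.json's cites.
def Pre_searchKommuner (kommuner : List (List (String × String))) (search : String) : Prop :=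
  ∀ k ∈ kommuner, PySem.Dict.contains (PySem.Dict.mk k) "Kommunenavn" = true ∧
    (PySem.Str.strIsdigit search = true → PySem.Dict.contains (PySem.Dict.mk k) "Nr" = true)
instance (kommuner : List (List (String × String))) (search : String) : Decidable (Pre_searchKommuner kommuner search) := by unfold Pre_searchKommuner; infer_instance

def pvWitness_searchKommuner : (List (List (String × String))) × String :=
  ([[("Nr", "0301"), ("Kommunenavn", "Oslo")], [("Nr", "4601"), ("Kommunenavn", "Bergen")]], "berg")

def Spec_searchKommuner (kommuner : List (List (String × String))) (search : String) (out : Option (List (String × String))) : Prop := out = searchKommuner_alt kommuner search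
instance (kommuner : List (List (String × String))) (search : String) (out : Option (List (String × String))) : Decidable (Spec_searchKommuner kommuner search out) := by unfold Spec_searchKommuner; infer_instance

-- ===== CLAIM (what is proved, stated in full; the proofs are below) =====
def Claim_equal_searchKommuner : Prop := ∀ (kommuner : List (List (String × String))) (search : String), Dom_searchKommuner kommuner search → Pre_searchKommuner kommuner search → Spec_searchKommuner kommuner search (searchKommuner kommuner search)

-- ===== LEMMAS AND PROOFS =====

theorem pv_startswith_isIn (name lower : String)
    (h : PySem.Str.startswith name lower = true) : PySem.Str.isIn lower name = true := by
  rw [PySem.Str.isIn_iff_infix]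
  have hp : lower.toList <+: name.toList := by
    rw [PySem.Str.startswith_eq, PySem.Chars.startswith_iff] at h
    exact h
  exact hp.isInfix

-- the fused loop's invariant: its result is the four-stage orElse chain of A's scans
theorem pvFused_eq (l : List (List (String × String))) (lower : String)
    (pre sub : Option (List (String × String))) :
    pvFused l lower pre sub =
      (((pvFindExact l lower).or pre).or (pvFindPrefix l lower) |>.or sub).or (pvFindSub l lower) := by
  induction l generalizing pre sub with
  | nil =>
    simp only [pvFused, pvFindExact, pvFindPrefix, pvFindSub, Option.none_or]
    cases pre <;> cases sub <;> rfl
  | cons k rest ih =>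
    by_cases hex : (PySem.Str.lower (PySem.Dict.getD (PySem.Dict.mk k) "Kommunenavn" "") == lower) = true
    · simp [pvFused, pvFindExact, hex]
    · simp only [pvFused, pvFindExact, pvFindPrefix, pvFindSub, hex, Bool.false_eq_true, if_false]
      by_cases hsw : PySem.Str.startswith (PySem.Str.lower (PySem.Dict.getD (PySem.Dict.mk k) "Kommunenavn" "")) lower = true
      · have hin := pv_startswith_isIn _ _ hsw
        simp only [hsw, hin, if_true]
        cases pre with
        | none =>
          simp only [Option.isNone_none, Bool.true_and, if_true, ih]
          cases pvFindExact rest lower <;> simp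
        | some p =>
          simp only [Option.isNone_some, Bool.false_and, Bool.false_eq_true, if_false]
          cases sub with
          | none =>
            simp only [Option.isNone_none, Bool.true_and, if_true, ih]
            cases pvFindExact rest lower <;> simp
          | some s =>
            simp only [Option.isNone_some, Bool.false_and, Bool.false_eq_true, if_false, ih]
            cases pvFindExact rest lower <;> simp
      · simp only [hsw, Bool.and_false, Bool.false_eq_true, if_false]
        by_cases hin : PySem.Str.isIn lower (PySem.Str.lower (PySem.Dict.getD (PySem.Dict.mk k) "Kommunenavn" "")) = true
        · simp only [hin, if_true]
          cases sub with
          | none =>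
            simp only [Option.isNone_none, Bool.true_and, if_true, ih]
            cases pvFindExact rest lower <;> cases pre <;> cases pvFindPrefix rest lower <;> simp
          | some s =>
            simp only [Option.isNone_some, Bool.false_and, Bool.false_eq_true, if_false, ih]
            cases pvFindExact rest lower <;> cases pre <;> cases pvFindPrefix rest lower <;> simp
        · simp only [hin, Bool.and_false, Bool.false_eq_true, if_false, ih]

-- ===== VERDICT (by name: the statement is the Claim_ definition above) =====
theorem searchKommuner_spec : Claim_equal_searchKommuner := by
  intro kommuner search _ _
  unfold Spec_searchKommuner searchKommuner searchKommuner_alt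
  cases hd : (if PySem.Str.strIsdigit search then pvFindNr kommuner search else none) with
  | some k => rfl
  | none =>
    simp only [pvFused_eq]
    cases pvFindExact kommuner (PySem.Str.lower search) <;>
      cases pvFindPrefix kommuner (PySem.Str.lower search) <;> simp
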